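-- pv_equiv track=rewrite | github.com/namtuanly/WikiTableSet | HTMLTable2Image/wiki_table_parser_ja.py | html_string2list
-- ===== SOURCE A (Python) =====
-- def html_string2list(html_string):
--     """this function convert string into list of char and html tag"""
--     list_ = []
--     idx_tag = -1
--     for i, char in enumerate(html_string):
--         if char == '<':
--             idx_tag = i
--         elif idx_tag != -1 and char == '>':
--             html_tag = html_string[idx_tag:i+1]
--
--             # ignore comment inside cell content
--             if html_tag.startswith('<!--') or html_tag.startswith('<!['):
--                 idx_tag = -1
--                 continue
--
--             list_.append(html_tag)
--             idx_tag = -1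
--         elif idx_tag == -1:
--             list_.append(char)
--
--     return list_
-- ===== SOURCE B (Python) =====
-- def html_string2list(html_string):
--     """this function convert string into list of char and html tag"""
--     parts = html_string.split('<')
--     out = [c for c in parts[0]]
--     for p in parts[1:]:
--         g = p.find('>')
--         if g == -1:
--             continue
--         tag = '<' + p[:g + 1]
--         if not (tag.startswith('<!--') or tag.startswith('<![')):
--             out.append(tag)
--         out.extend(p[g + 1:])
--     return out
-- ===== Notes on version B (the rewrite author's own statement) =====
-- stated objective: simpler
-- what changed: Replaces A's per-character scan with an idx_tag state machine by splitting the string on the tag-open character and scanning each segment only for its first tag-close character (the segment prefix becomes the tag, the remainder plain characters).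
import Mathlib
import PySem

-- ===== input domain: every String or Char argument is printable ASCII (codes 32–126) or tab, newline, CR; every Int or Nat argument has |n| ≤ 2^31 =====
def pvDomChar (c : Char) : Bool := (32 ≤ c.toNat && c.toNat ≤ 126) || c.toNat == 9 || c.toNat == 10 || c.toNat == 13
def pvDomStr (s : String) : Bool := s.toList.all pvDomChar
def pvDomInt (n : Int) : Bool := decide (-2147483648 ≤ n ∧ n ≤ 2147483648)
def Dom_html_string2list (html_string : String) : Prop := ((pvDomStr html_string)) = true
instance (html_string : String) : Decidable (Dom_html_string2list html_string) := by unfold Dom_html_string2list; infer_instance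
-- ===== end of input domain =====

-- B replaces A's per-character index state machine by splitting on the tag-open character and
-- scanning each segment for its first tag-close character (objective: simpler; same asymptotic cost).


-- ===== PORT A =====
-- one loop step of A: state = (list_, idx_tag); p = (i, char); cs = the char list of html_string
def stepA (cs : List Char) (st : List String × Int) (p : Int × Char) : List String × Int :=
  let list_ := st.1
  let idx_tag := st.2
  let i := p.1
  let char := p.2
  if char = '<' then (list_, i)
  else if idx_tag ≠ -1 ∧ char = '>' then
    -- html_string[idx_tag:i+1]  (string slicing done on the code-point list, exact)
    let html_tag := String.ofList (PySem.List.slice cs (some idx_tag) (some (i + 1)))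
    if PySem.Str.startswith html_tag "<!--" || PySem.Str.startswith html_tag "<![" then
      (list_, -1)
    else
      (list_ ++ [html_tag], -1)
  else if idx_tag = -1 then (list_ ++ [String.ofList [char]], idx_tag)
  else (list_, idx_tag)

def html_string2list (html_string : String) : List String :=
  ((PySem.List.enumerate html_string.toList 0).foldl (stepA html_string.toList) ([], -1)).1

-- ===== PORT B =====
-- loop body of B over one segment p (the text that followed one '<')
def bodyB (out : List String) (p : List Char) : List String :=
  let g := PySem.Chars.find p ['>']
  if g = -1 then out
  else
    let tag := String.ofList ('<' :: PySem.List.slice p none (some (g + 1)))  -- '<' + p[:g+1]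
    let out := if PySem.Str.startswith tag "<!--" || PySem.Str.startswith tag "<![" then out
               else out ++ [tag]
    out ++ (PySem.List.slice p (some (g + 1)) none).map (fun c => String.ofList [c])  -- extend p[g+1:]

def html_string2list_alt (html_string : String) : List String :=
  match PySem.Chars.splitOn html_string.toList ['<'] with
  | [] => []  -- unreachable: split never returns []
  | p0 :: rest => rest.foldl bodyB (p0.map (fun c => String.ofList [c]))

-- ===== PRECONDITION & SPEC =====
def Spec_html_string2list (html_string : String) (out : List String) : Prop := out = html_string2list_alt html_string
instance (html_string : String) (out : List String) : Decidable (Spec_html_string2list html_string out) := by unfold Spec_html_string2list; infer_instance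

-- ===== CLAIM (what is proved, stated in full; the proofs are below) =====
def Claim_equal_html_string2list : Prop := ∀ (html_string : String), Dom_html_string2list html_string → Spec_html_string2list html_string (html_string2list html_string)

-- ===== LEMMAS AND PROOFS =====

-- a single character as a Python string
def chr (c : Char) : String := String.ofList [c]

-- append the tag unless it is a comment tag
def emit (tag : List Char) : List String :=
  if PySem.Str.startswith (String.ofList tag) "<!--" || PySem.Str.startswith (String.ofList tag) "<![" then []
  else [String.ofList tag]

-- common functional specification of both programs: spec none = outside a tag,
-- spec (some acc) = inside a pending tag whose chars so far (from the last '<') are acc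
def spec : Option (List Char) → List Char → List String
  | _, [] => []
  | om, c :: t =>
    if c = '<' then spec (some ['<']) t
    else
      match om with
      | none => chr c :: spec none t
      | some acc => if c = '>' then emit (acc ++ ['>']) ++ spec none t
                    else spec (some (acc ++ [c])) t

-- what B contributes for one segment
def seg (p : List Char) : List String :=
  if PySem.Chars.find p ['>'] = -1 then []
  else
    emit ('<' :: PySem.List.slice p none (some (PySem.Chars.find p ['>'] + 1)))
      ++ (PySem.List.slice p (some (PySem.Chars.find p ['>'] + 1)) none).map chr

-- structural reference version of str.split('<')
def splitSpec (c : Char) : List Char → List (List Char)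
  | [] => [[]]
  | x :: t =>
    if x = c then [] :: splitSpec c t
    else
      match splitSpec c t with
      | [] => [[x]]
      | q :: qs => (x :: q) :: qs

def consHead (pre : List Char) : List (List Char) → List (List Char)
  | [] => [pre]
  | q :: qs => (pre ++ q) :: qs

lemma splitSpec_ne_nil (c : Char) (cs : List Char) : splitSpec c cs ≠ [] := by
  cases cs with
  | nil => simp [splitSpec]
  | cons x t =>
    simp only [splitSpec]
    split_ifs
    · simp
    · cases splitSpec c t <;> simp

lemma go_spec (c : Char) : ∀ (l : List Char) (fuel : Nat) (cur : List Char) (acc : List (List Char)),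
    l.length < fuel →
    PySem.Chars.splitOn.go [c] fuel l cur acc = acc.reverse ++ consHead cur.reverse (splitSpec c l) := by
  intro l
  induction l with
  | nil =>
    intro fuel cur acc h
    cases fuel with
    | zero => omega
    | succ f => simp [PySem.Chars.splitOn.go, splitSpec, consHead]
  | cons x t ih =>
    intro fuel cur acc h
    cases fuel with
    | zero => omega
    | succ f =>
      have hpre : [c].isPrefixOf (x :: t) = (c == x) := by simp [List.isPrefixOf]
      by_cases hx : x = c
      · have hgo : PySem.Chars.splitOn.go [c] (f + 1) (x :: t) cur acc
            = PySem.Chars.splitOn.go [c] f t [] (cur.reverse :: acc) := by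
          simp [PySem.Chars.splitOn.go, hx]
        rw [hgo, ih f [] (cur.reverse :: acc) (by simpa using h)]
        cases hsp : splitSpec c t with
        | nil => exact absurd hsp (splitSpec_ne_nil c t)
        | cons q qs => simp [splitSpec, consHead, hsp, hx]
      · have hgo : PySem.Chars.splitOn.go [c] (f + 1) (x :: t) cur acc
            = PySem.Chars.splitOn.go [c] f t (x :: cur) acc := by
          have : (c == x) = false := by simp [Ne.symm hx]
          simp [PySem.Chars.splitOn.go, hpre, this]
        rw [hgo, ih f (x :: cur) acc (by simpa using h)]
        cases hsp : splitSpec c t with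
        | nil => exact absurd hsp (splitSpec_ne_nil c t)
        | cons q qs => simp [splitSpec, consHead, hsp, hx]

lemma splitOn_eq_splitSpec (c : Char) (cs : List Char) :
    PySem.Chars.splitOn cs [c] = splitSpec c cs := by
  unfold PySem.Chars.splitOn
  rw [go_spec c cs (cs.length + 1) [] [] (by omega)]
  cases hsp : splitSpec c cs with
  | nil => exact absurd hsp (splitSpec_ne_nil c cs)
  | cons q qs => simp [consHead]

lemma splitSpec_facts (c : Char) : ∀ (cs p : List Char) (ps : List (List Char)),
    splitSpec c cs = p :: ps →
    c ∉ p ∧ (∀ q ∈ ps, c ∉ q) ∧ cs = p ++ ps.flatMap (fun q => c :: q) := by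
  intro cs
  induction cs with
  | nil =>
    intro p ps h
    simp only [splitSpec, List.cons.injEq] at h
    obtain ⟨rfl, rfl⟩ := h
    simp
  | cons x t ih =>
    intro p ps h
    by_cases hx : x = c
    · rw [splitSpec, if_pos hx] at h
      obtain ⟨rfl, rfl⟩ := List.cons.injEq .. |>.mp h
      cases hsp : splitSpec c t with
      | nil => exact absurd hsp (splitSpec_ne_nil c t)
      | cons q qs =>
        obtain ⟨hq, hqs, hrec⟩ := ih q qs hsp
        refine ⟨by simp, ?_, ?_⟩
        · intro r hr
          rcases List.mem_cons.mp hr with rfl | hr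
          · exact hq
          · exact hqs r hr
        · simp [hx, hrec]
    · rw [splitSpec, if_neg hx] at h
      cases hsp : splitSpec c t with
      | nil => exact absurd hsp (splitSpec_ne_nil c t)
      | cons q qs =>
        rw [hsp] at h
        obtain ⟨rfl, rfl⟩ := List.cons.injEq .. |>.mp h
        obtain ⟨hq, hqs, hrec⟩ := ih q qs hsp
        refine ⟨?_, hqs, by simp [← hrec]⟩
        intro hc
        rcases List.mem_cons.mp hc with h' | h'
        · exact hx h'.symm
        · exact hq h' 

-- A-side loop invariant
lemma A_loop (cs : List Char) : ∀ (t p : List Char) (out : List String), cs = p ++ t →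
    (((PySem.List.enumerate t (p.length : Int)).foldl (stepA cs) (out, -1)).1 = out ++ spec none t)
  ∧ (∀ j : Nat, j ≤ p.length →
      ((PySem.List.enumerate t (p.length : Int)).foldl (stepA cs) (out, (j : Int))).1
        = out ++ spec (some (p.drop j)) t) := by
  intro t
  induction t with
  | nil =>
    intro p out h
    constructor
    · simp [PySem.List.enumerate_nil, spec]
    · intro j hj
      simp [PySem.List.enumerate_nil, spec]
  | cons ch t ih =>
    intro p out hcs
    have hlen : ((p.length : Int)) + 1 = (((p ++ [ch]).length : Nat) : Int) := by
      push_cast [List.length_append, List.length_cons, List.length_nil]; ring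
    have hcs' : cs = (p ++ [ch]) ++ t := by simpa [List.append_assoc] using hcs
    constructor
    · rw [PySem.List.enumerate_cons, List.foldl_cons]
      by_cases hch : ch = '<'
      · have hstep : stepA cs (out, -1) ((p.length : Int), ch) = (out, (p.length : Int)) := by
          simp [stepA, hch]
        rw [hstep, hlen, (ih (p ++ [ch]) out hcs').2 p.length (by simp)]
        subst hch
        simp [spec]
      · have hstep : stepA cs (out, -1) ((p.length : Int), ch)
            = (out ++ [String.ofList [ch]], -1) := by
          simp [stepA, hch]
        rw [hstep, hlen, (ih (p ++ [ch]) (out ++ [String.ofList [ch]]) hcs').1]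
        simp [spec, hch, chr]
    · intro j hj
      rw [PySem.List.enumerate_cons, List.foldl_cons]
      by_cases hch : ch = '<'
      · have hstep : stepA cs (out, (j : Int)) ((p.length : Int), ch) = (out, (p.length : Int)) := by
          simp [stepA, hch]
        rw [hstep, hlen, (ih (p ++ [ch]) out hcs').2 p.length (by simp)]
        subst hch
        simp [spec]
      · have hne : ((j : Int)) ≠ -1 := by omega
        by_cases hgt : ch = '>'
        · subst hgt
          have hslice : PySem.List.slice cs (some (j : Int)) (some ((p.length : Int) + 1))
              = p.drop j ++ ['>'] := by
            rw [hcs, show ((p.length : Int) + 1) = (((p.length + 1 : Nat)) : Int) by push_cast; ring,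
              PySem.List.slice_natCast, List.drop_append_of_le_length hj]
            have h1 : (p.drop j).length = p.length - j := List.length_drop
            rw [List.take_append, List.take_of_length_le (by omega)]
            have h2 : p.length + 1 - j - (p.drop j).length = 1 := by omega
            rw [h2]
            simp
          have hstep : stepA cs (out, (j : Int)) ((p.length : Int), '>')
              = (out ++ emit (p.drop j ++ ['>']), -1) := by
            unfold stepA
            rw [if_neg (by decide : ¬ ('>' = '<'))]
            rw [if_pos (⟨hne, rfl⟩ : ((j : Int) ≠ -1 ∧ '>' = '>'))]
            rw [hslice]
            by_cases hcm : (PySem.Str.startswith (String.ofList (List.drop j p ++ ['>'])) "<!--"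
                || PySem.Str.startswith (String.ofList (List.drop j p ++ ['>'])) "<![") = true
            · rw [if_pos hcm]
              unfold emit
              rw [if_pos hcm]
              simp
            · rw [if_neg hcm]
              unfold emit
              rw [if_neg hcm]
          rw [hstep, hlen, (ih (p ++ ['>']) _ hcs').1]
          simp [spec, show ¬(('>' : Char) = '<') by decide]
        · have hstep : stepA cs (out, (j : Int)) ((p.length : Int), ch) = (out, (j : Int)) := by
            simp [stepA, hch, hgt, hne]
          rw [hstep, hlen, (ih (p ++ [ch]) out hcs').2 j (by simp; omega)]
          rw [List.drop_append_of_le_length hj]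
          simp [spec, hch, hgt]

lemma A_eq (s : String) : html_string2list s = spec none s.toList := by
  have h := (A_loop s.toList s.toList [] [] rfl).1
  simpa [html_string2list] using h

-- B-side lemmas
lemma bodyB_eq_seg (out : List String) (p : List Char) : bodyB out p = out ++ seg p := by
  by_cases hg : PySem.Chars.find p ['>'] = -1
  · unfold bodyB seg
    simp [hg]
  · unfold bodyB seg emit chr
    simp only [if_neg hg]
    split_ifs with h <;> simp

lemma foldl_bodyB : ∀ (ps : List (List Char)) (out : List String),
    ps.foldl bodyB out = out ++ ps.flatMap seg := by
  intro ps
  induction ps with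
  | nil => simp
  | cons p ps ih => intro out; simp [List.foldl_cons, bodyB_eq_seg, ih]

lemma spec_none_append (w : List Char) (r : List Char) (h : '<' ∉ w) :
    spec none (w ++ r) = w.map chr ++ spec none r := by
  induction w with
  | nil => simp
  | cons c w ih =>
    simp only [List.mem_cons, not_or] at h
    simp [spec, Ne.symm h.1, ih h.2]

lemma spec_some_append (p : List Char) (r : List Char) :
    ∀ acc, '<' ∉ p → '>' ∉ p → spec (some acc) (p ++ r) = spec (some (acc ++ p)) r := by
  induction p with
  | nil => simp
  | cons c p ih =>
    intro acc h1 h2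
    simp only [List.mem_cons, not_or] at h1 h2
    rw [List.cons_append]
    show spec (some acc) (c :: (p ++ r)) = _
    rw [show spec (some acc) (c :: (p ++ r)) = spec (some (acc ++ [c])) (p ++ r) by
      simp [spec, Ne.symm h1.1, Ne.symm h2.1]]
    rw [ih (acc ++ [c]) h1.2 h2.2]
    simp

lemma spec_some_flat (acc : List (Char)) (ps : List (List Char)) :
    spec (some acc) (ps.flatMap (fun p => '<' :: p)) = spec none (ps.flatMap (fun p => '<' :: p)) := by
  cases ps with
  | nil => simp [spec]
  | cons q ps => simp [spec]

lemma S_lemma : ∀ (ps : List (List Char)) (p0 : List Char), '<' ∉ p0 → (∀ p ∈ ps, '<' ∉ p) →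
    spec none (p0 ++ ps.flatMap (fun p => '<' :: p)) = p0.map chr ++ ps.flatMap seg := by
  intro ps
  induction ps with
  | nil =>
    intro p0 h0 _
    have := spec_none_append p0 [] h0
    simpa [spec] using this
  | cons q ps ih =>
    intro p0 h0 hall
    have hq : '<' ∉ q := hall q (by simp)
    have hps : ∀ p ∈ ps, '<' ∉ p := fun p hp => hall p (by simp [hp])
    have ihR : spec none (ps.flatMap (fun p => '<' :: p)) = ps.flatMap seg := by
      have := ih [] (by simp) hps
      simpa using this
    rw [List.flatMap_cons,
      show p0 ++ (('<' :: q) ++ ps.flatMap (fun p => '<' :: p))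
        = p0 ++ ('<' :: (q ++ ps.flatMap (fun p => '<' :: p))) by simp,
      spec_none_append p0 _ h0,
      show spec none ('<' :: (q ++ ps.flatMap (fun p => '<' :: p)))
        = spec (some ['<']) (q ++ ps.flatMap (fun p => '<' :: p)) by simp [spec]]
    by_cases hgt : '>' ∈ q
    · have hinf : ['>'] <:+: q := by
        obtain ⟨s1, s2, rfl⟩ := List.append_of_mem hgt
        exact ⟨s1, s2, by simp⟩
      have hne : PySem.Chars.find q ['>'] ≠ -1 := (PySem.Chars.find_ne_neg_one_iff q ['>']).mpr hinf
      have hnn : 0 ≤ PySem.Chars.find q ['>'] := (PySem.Chars.find_nonneg_iff q ['>']).mpr hinf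
      obtain ⟨hpre, hmin⟩ := PySem.Chars.find_spec hnn
      set gN := (PySem.Chars.find q ['>']).toNat with hgN
      obtain ⟨w, hw⟩ := hpre
      have hlt : gN < q.length := by
        by_contra hge
        rw [List.drop_eq_nil_of_le (by omega)] at hw
        simp at hw
      have hdecomp : q = q.take gN ++ '>' :: w := by
        conv_lhs => rw [← List.take_append_drop gN q, ← hw]
        simp
      have hmlt : '<' ∉ q.take gN := fun hm => hq (List.take_subset _ _ hm)
      have hwlt : '<' ∉ w := fun hm => hq (by rw [hdecomp]; simp [hm])
      have hmgt : '>' ∉ q.take gN := by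
        intro hm
        obtain ⟨i, hi, hget⟩ := List.getElem_of_mem hm
        have hi2 : i < gN ∧ i < q.length := by
          have := hi
          simp only [List.length_take, lt_inf_iff] at this
          exact this
        refine hmin i hi2.1 ⟨q.drop (i + 1), ?_⟩
        rw [List.drop_eq_getElem_cons hi2.2]
        have hqi : q[i] = '>' := by
          rw [← hget]
          exact ((q.take_prefix gN).getElem hi).symm
        simp [hqi]
      have hcast : PySem.Chars.find q ['>'] = (gN : Int) := (Int.toNat_of_nonneg hnn).symm
      have hcast1 : PySem.Chars.find q ['>'] + 1 = ((gN + 1 : Nat) : Int) := by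
        rw [hcast]; push_cast; ring
      have hlentake : (q.take gN).length = gN := by simp [hlt.le]
      have hslice1 : PySem.List.slice q none (some (PySem.Chars.find q ['>'] + 1))
          = q.take gN ++ ['>'] := by
        rw [hcast1, PySem.List.slice_to_natCast]
        conv_lhs => rw [hdecomp]
        rw [List.take_append, List.take_of_length_le (by omega)]
        have h2 : gN + 1 - (q.take gN).length = 1 := by omega
        rw [h2]
        simp
      have hslice2 : PySem.List.slice q (some (PySem.Chars.find q ['>'] + 1)) none = w := by
        rw [hcast1, PySem.List.slice_from_natCast]
        conv_lhs => rw [hdecomp]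
        rw [List.drop_append, List.drop_eq_nil_of_le (by omega)]
        have h2 : gN + 1 - (q.take gN).length = 1 := by omega
        rw [h2]
        simp
      have hseg : seg q = emit ('<' :: (q.take gN ++ ['>'])) ++ w.map chr := by
        unfold seg
        rw [if_neg hne, hslice1, hslice2]
      calc p0.map chr ++ spec (some ['<']) (q ++ ps.flatMap (fun p => '<' :: p))
          = p0.map chr ++ spec (some ['<'])
              (q.take gN ++ ('>' :: (w ++ ps.flatMap (fun p => '<' :: p)))) := by
            conv_lhs => rw [hdecomp]
            simp
        _ = p0.map chr ++ spec (some ('<' :: q.take gN))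
              ('>' :: (w ++ ps.flatMap (fun p => '<' :: p))) := by
            rw [spec_some_append _ _ ['<'] hmlt hmgt]
            simp
        _ = p0.map chr ++ (emit (('<' :: q.take gN) ++ ['>'])
              ++ spec none (w ++ ps.flatMap (fun p => '<' :: p))) := by
            simp [spec, show ¬(('>' : Char) = '<') by decide]
        _ = p0.map chr ++ ((q :: ps).flatMap seg) := by
            rw [spec_none_append w _ hwlt, ihR, List.flatMap_cons, hseg]
            simp
  
    · have hfind : PySem.Chars.find q ['>'] = -1 := by
        apply (PySem.Chars.find_eq_neg_one_iff q ['>']).mpr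
        intro hinf
        obtain ⟨s1, s2, hq'⟩ := hinf
        exact hgt (by rw [← hq']; simp)
      have hseg : seg q = [] := by simp [seg, hfind]
      rw [spec_some_append q _ ['<'] hq hgt, spec_some_flat, ihR]
      simp [hseg]

lemma B_eq (s : String) : html_string2list_alt s = spec none s.toList := by
  unfold html_string2list_alt
  rw [splitOn_eq_splitSpec]
  cases h : splitSpec '<' s.toList with
  | nil => exact absurd h (splitSpec_ne_nil _ _)
  | cons p ps =>
    obtain ⟨h1, h2, h3⟩ := splitSpec_facts '<' s.toList p ps h
    have hred : (match p :: ps with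
        | [] => ([] : List String)
        | p0 :: rest => List.foldl bodyB (List.map (fun c => String.ofList [c]) p0) rest)
        = List.foldl bodyB (List.map (fun c => String.ofList [c]) p) ps := rfl
    rw [hred, foldl_bodyB, h3, S_lemma ps p h1 h2]
    rfl

-- ===== VERDICT (by name: the statement is the Claim_ definition above) =====
theorem html_string2list_spec : Claim_equal_html_string2list := by
  intro s _
  unfold Spec_html_string2list
  rw [A_eq, B_eq]
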